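-- pv_equiv track=rewrite | github.com/2020202014Geeta/2020202014_Assignment3a | q2.py | addLeapDays
-- ===== SOURCE A (Python) =====
-- def checkLeapYear(year):
--     if (year % 4) == 0:
--         if (year % 100) == 0:
--             if (year % 400) == 0:
--                 oddDays = 1
--             else:
--                 oddDays = 0
--         else:
--             oddDays = 1
--     else:
--         oddDays = 0
--     return oddDays
--
-- def addLeapDays(y1,y2):
--     days = 0
--     i = y1 + 1
--     while i < y2:
--         if(checkLeapYear(i)):
--             days = days + 366
--         else:
--             days = days + 365
--         i = i + 1
--     return days
-- ===== SOURCE B (Python) =====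
-- def addLeapDays(y1, y2):
--     # Closed form: O(1) instead of A's O(y2-y1) loop.
--     if y2 - y1 <= 1:
--         return 0
--     def leaps(n):
--         return n // 4 - n // 100 + n // 400
--     return (y2 - y1 - 1) * 365 + leaps(y2 - 1) - leaps(y1)
-- ===== Notes on version B (the rewrite author's own statement) =====
-- stated objective: faster
-- what changed: Replaces the year-by-year while loop with a closed-form count: (y2-y1-1)*365 plus the leap-year count in the open interval computed by floor-division (n//4 - n//100 + n//400).
import Mathlib
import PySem

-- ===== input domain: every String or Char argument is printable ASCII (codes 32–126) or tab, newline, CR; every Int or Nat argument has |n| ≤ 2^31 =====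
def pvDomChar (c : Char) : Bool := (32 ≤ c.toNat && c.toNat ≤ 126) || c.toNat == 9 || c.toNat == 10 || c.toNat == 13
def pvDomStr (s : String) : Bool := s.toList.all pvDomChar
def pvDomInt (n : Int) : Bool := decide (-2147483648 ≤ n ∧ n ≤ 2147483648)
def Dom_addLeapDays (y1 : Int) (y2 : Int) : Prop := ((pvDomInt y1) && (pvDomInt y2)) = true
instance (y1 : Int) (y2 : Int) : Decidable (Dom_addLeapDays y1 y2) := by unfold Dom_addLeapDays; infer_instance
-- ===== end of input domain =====

-- B replaces A's year-by-year while loop with an O(1) closed form (365 per year plus a floor-division leap count); objective: faster.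


-- ===== PORT A =====
def checkLeapYear (year : Int) : Int :=
  if PySem.Int.mod year 4 = 0 then
    if PySem.Int.mod year 100 = 0 then
      if PySem.Int.mod year 400 = 0 then 1 else 0
    else 1
  else 0

def addLeapDaysLoop (y2 : Int) (i : Int) (days : Int) : Int :=
  if _h : i < y2 then
    addLeapDaysLoop y2 (i + 1) (days + if checkLeapYear i ≠ 0 then 366 else 365)
  else days
termination_by (y2 - i).toNat
decreasing_by omega

def addLeapDays (y1 : Int) (y2 : Int) : Int :=
  addLeapDaysLoop y2 (y1 + 1) 0

-- ===== PORT B =====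
def pvLeaps (n : Int) : Int :=
  PySem.Int.floordiv n 4 - PySem.Int.floordiv n 100 + PySem.Int.floordiv n 400

def addLeapDays_alt (y1 : Int) (y2 : Int) : Int :=
  if y2 - y1 ≤ 1 then 0
  else (y2 - y1 - 1) * 365 + pvLeaps (y2 - 1) - pvLeaps y1

-- ===== PRECONDITION & SPEC =====
def Spec_addLeapDays (y1 : Int) (y2 : Int) (out : Int) : Prop := out = addLeapDays_alt y1 y2
instance (y1 : Int) (y2 : Int) (out : Int) : Decidable (Spec_addLeapDays y1 y2 out) := by unfold Spec_addLeapDays; infer_instance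

-- ===== CLAIM (what is proved, stated in full; the proofs are below) =====
def Claim_equal_addLeapDays : Prop := ∀ (y1 : Int) (y2 : Int), Dom_addLeapDays y1 y2 → Spec_addLeapDays y1 y2 (addLeapDays y1 y2)

-- ===== LEMMAS AND PROOFS =====

-- one step of the leap count: L(i) - L(i-1) is exactly the leap bit of year i
theorem pvLeaps_step (i : Int) :
    pvLeaps i - pvLeaps (i - 1) = (if checkLeapYear i ≠ 0 then 1 else 0) := by
  simp only [pvLeaps, checkLeapYear, PySem.Int.floordiv, PySem.Int.mod,
    Int.fdiv_eq_ediv, Int.fmod_eq_emod]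
  split_ifs <;> omega

-- loop invariant: the loop adds the closed-form total for years in [i, y2)
theorem addLeapDaysLoop_closed (y2 i days : Int) :
    addLeapDaysLoop y2 i days =
      days + (if y2 ≤ i then 0 else (y2 - i) * 365 + pvLeaps (y2 - 1) - pvLeaps (i - 1)) := by
  rw [addLeapDaysLoop]
  by_cases h : i < y2
  · rw [dif_pos h, addLeapDaysLoop_closed y2 (i + 1)]
    have hs := pvLeaps_step i
    simp only [add_sub_cancel_right]
    by_cases h2 : y2 ≤ i + 1
    · obtain rfl : y2 = i + 1 := by omega
      simp only [add_sub_cancel_right, if_pos h2, if_neg (by omega : ¬ (i + 1 : Int) ≤ i)]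
      split_ifs at hs ⊢ <;> omega
    · rw [if_neg h2, if_neg (by omega : ¬ y2 ≤ i)]
      split_ifs at hs ⊢ <;> omega
  · rw [dif_neg h, if_pos (by omega : y2 ≤ i)]
    omega
termination_by (y2 - i).toNat
decreasing_by omega

-- ===== VERDICT (by name: the statement is the Claim_ definition above) =====
theorem addLeapDays_spec : Claim_equal_addLeapDays := by
  intro y1 y2 _
  unfold Spec_addLeapDays addLeapDays addLeapDays_alt
  rw [addLeapDaysLoop_closed]
  simp only [add_sub_cancel_right]
  split_ifs <;> omega
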